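-- pv_equiv track=rewrite | github.com/Youthstudy/data_process_tool | data_process/data_processed.py | split_list
-- ===== SOURCE A (Python) =====
-- def split_list(list):
--     temp = []
--     index_list = []
--     s_list = []
--     flag = 0
--     for i in list[0]:
--         try :
--             temp.index(i)
--         except ValueError:
--             temp.append(i)
--             index_list.append([])
--
--         for a in range(len(temp)):
--             if temp[a] == i:
--                 index_list[a].append(flag)
--         flag += 1
--
--     for i in range(len(index_list)):
--         s_list.append([])
--         a = 0
--         for j in index_list[i]:
--             s_list[i].append([])
--             for k in range(len(list)):
--                 s_list[i][a].append(list[k][j])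
--             a += 1
--     return s_list
-- ===== SOURCE B (Python) =====
-- def split_list(list):
--     # Transpose first (raises the same IndexError on empty/ragged input),
--     # then group whole columns by their first entry in first-appearance order.
--     columns = [[row[j] for row in list] for j in range(len(list[0]))]
--     keys = []
--     s_list = []
--     for col in columns:
--         for a, k in enumerate(keys):
--             if k == col[0]:
--                 s_list[a].append(col)
--                 break
--         else:
--             keys.append(col[0])
--             s_list.append([col])
--     return s_list
-- ===== Notes on version B (the rewrite author's own statement) =====
-- stated objective: simpler
-- what changed: Instead of A's two phases (collect per-value column-index lists from the first row, then rebuild every grouped column element by element), B builds the transposed table once and groups whole columns by their first entry in a single pass, keeping an ordered key list.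
import Mathlib
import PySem

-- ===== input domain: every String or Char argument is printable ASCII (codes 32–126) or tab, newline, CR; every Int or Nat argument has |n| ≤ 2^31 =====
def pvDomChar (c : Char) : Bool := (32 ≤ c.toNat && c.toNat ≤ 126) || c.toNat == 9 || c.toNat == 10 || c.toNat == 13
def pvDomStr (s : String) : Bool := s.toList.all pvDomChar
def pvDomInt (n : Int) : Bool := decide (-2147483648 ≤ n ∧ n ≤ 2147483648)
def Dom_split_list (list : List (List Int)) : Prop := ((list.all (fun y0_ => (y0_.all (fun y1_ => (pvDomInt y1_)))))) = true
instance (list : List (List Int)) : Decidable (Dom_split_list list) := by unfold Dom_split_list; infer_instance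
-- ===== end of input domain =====

-- B transposes the table once and groups whole columns by their first entry in one
-- pass (objective: simpler — no position bookkeeping and no second rebuild phase).

-- ===== PORT A =====
def split_list (list : List (List Int)) : List (List (List Int)) :=
  let first := PySem.List.pyGetD list 0 []   -- list[0]; Pre_ excludes the IndexError on list = []
  let st :=
    first.foldl (fun (st : List Int × List (List Int) × Int) i =>
      match st with
      | (temp, index_list, flag) =>
        -- try: temp.index(i) / except ValueError: append to temp and index_list
        let (temp, index_list) :=
          match PySem.List.index? temp i with
          | some _ => (temp, index_list)
          | none => (temp ++ [i], index_list ++ [[]])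
        -- for a in range(len(temp)): if temp[a] == i: index_list[a].append(flag)
        let index_list :=
          (List.range temp.length).foldl (fun il (a : Nat) =>
            if PySem.List.pyGetD temp (a : Int) 0 = i then il.modify a (· ++ [flag]) else il)
            index_list
        (temp, index_list, flag + 1)) ([], [], 0)
  let index_list := st.2.1
  -- second pass: rebuild each grouped column from the stored positions
  index_list.foldl (fun s_i il =>
    s_i ++ [il.foldl (fun grp j =>
      grp ++ [(PySem.List.pyRange 0 (list.length : Int) 1).foldl (fun col k =>
        col ++ [PySem.List.pyGetD (PySem.List.pyGetD list k []) j 0]) []]) []]) []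

-- ===== PORT B =====
def split_list_alt (list : List (List Int)) : List (List (List Int)) :=
  -- columns = [[row[j] for row in list] for j in range(len(list[0]))]
  let columns := (List.range (PySem.List.pyGetD list 0 []).length).map
    (fun (j : Nat) => list.map (fun row => PySem.List.pyGetD row (j : Int) 0))
  (columns.foldl (fun (st : List Int × List (List (List Int))) col =>
    let h := PySem.List.pyGetD col 0 0
    -- for a, k in enumerate(keys): if k == h: append and break / else: new group
    match st.1.findIdx? (· == h) with
    | some a => (st.1, st.2.modify a (· ++ [col]))
    | none => (st.1 ++ [h], st.2 ++ [[col]])) ([], [])).2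

-- ===== PRECONDITION & SPEC =====
-- Pre_ excludes exactly the inputs where Python A raises IndexError: the empty table
-- (list[0]) and ragged tables whose later rows are shorter than the first row (list[k][j]).
def Pre_split_list (list : List (List Int)) : Prop :=
  list ≠ [] ∧ ∀ row ∈ list, (list.headD []).length ≤ row.length
instance (list : List (List Int)) : Decidable (Pre_split_list list) := by
  unfold Pre_split_list; infer_instance
def pvWitness_split_list : List (List Int) := [[1, 2, 1], [3, 4, 5]]

def Spec_split_list (list : List (List Int)) (out : List (List (List Int))) : Prop := out = split_list_alt list
instance (list : List (List Int)) (out : List (List (List Int))) : Decidable (Spec_split_list list out) := by unfold Spec_split_list; infer_instance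

-- ===== CLAIM (what is proved, stated in full; the proofs are below) =====
def Claim_equal_split_list : Prop := ∀ (list : List (List Int)), Dom_split_list list → Pre_split_list list → Spec_split_list list (split_list list)

-- ===== LEMMAS AND PROOFS =====

-- the column at position j, as both ports ultimately build it
def pvColAt (list : List (List Int)) (j : Int) : List Int :=
  list.map (fun row => PySem.List.pyGetD row j 0)

-- A's inner positional-update loop, named for the proofs
def pvUpd (temp : List Int) (i : Int) (flag : Int) (il : List (List Int)) : List (List Int) :=
  (List.range temp.length).foldl (fun il (a : Nat) =>
    if PySem.List.pyGetD temp (a : Int) 0 = i then il.modify a (· ++ [flag]) else il) il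

-- A's phase-1 step and B's step, named for the proofs
def pvStepA (st : List Int × List (List Int) × Int) (i : Int) : List Int × List (List Int) × Int :=
  match st with
  | (temp, index_list, flag) =>
    let (temp, index_list) :=
      match PySem.List.index? temp i with
      | some _ => (temp, index_list)
      | none => (temp ++ [i], index_list ++ [[]])
    (temp, pvUpd temp i flag index_list, flag + 1)

def pvStepB (st : List Int × List (List (List Int))) (col : List Int) : List Int × List (List (List Int)) :=
  let h := PySem.List.pyGetD col 0 0
  match st.1.findIdx? (· == h) with
  | some a => (st.1, st.2.modify a (· ++ [col]))
  | none => (st.1 ++ [h], st.2 ++ [[col]])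

theorem pvFoldl_cons_head {α β : Type} (l : List β) (F : List α → β → List α)
    (G : List α → β → List α) (h : α)
    (hFG : ∀ t a, F (h :: t) a = h :: G t a) (tl : List α) :
    l.foldl F (h :: tl) = h :: l.foldl G tl := by
  induction l generalizing tl with
  | nil => rfl
  | cons b bs ih => simp only [List.foldl_cons, hFG, ih]

theorem pvUpd_cons (t : Int) (rest : List Int) (i flag : Int) (g : List Int)
    (il : List (List Int)) :
    pvUpd (t :: rest) i flag (g :: il)
      = (if t = i then g ++ [flag] else g) :: pvUpd rest i flag il := by
  unfold pvUpd
  rw [List.length_cons, List.range_succ_eq_map, List.foldl_cons, List.foldl_map]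
  have h0 : PySem.List.pyGetD (t :: rest) ((0 : Nat) : Int) 0 = t := by
    rw [PySem.List.pyGetD_natCast]
    rfl
  rw [h0]
  have hstep : ∀ (tl : List (List Int)) (a : Nat) (g' : List Int),
      (if PySem.List.pyGetD (t :: rest) ((a.succ : Nat) : Int) 0 = i
        then (g' :: tl).modify a.succ (· ++ [flag]) else (g' :: tl))
      = g' :: (if PySem.List.pyGetD rest (a : Int) 0 = i
        then tl.modify a (· ++ [flag]) else tl) := by
    intro tl a g'
    have hg : PySem.List.pyGetD (t :: rest) ((a.succ : Nat) : Int) 0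
        = PySem.List.pyGetD rest (a : Int) 0 := by
      rw [PySem.List.pyGetD_natCast, PySem.List.pyGetD_natCast]
      rfl
    rw [hg]
    by_cases hc : PySem.List.pyGetD rest (a : Int) 0 = i
    · rw [if_pos hc, if_pos hc, List.modify_cons]
      simp
    · rw [if_neg hc, if_neg hc]
  by_cases ht : t = i
  · rw [if_pos ht, if_pos ht]
    rw [show (g :: il).modify 0 (· ++ [flag]) = (g ++ [flag]) :: il by
      rw [List.modify_cons]; simp]
    exact pvFoldl_cons_head _ _ _ _ (fun tl a => hstep tl a _) il
  · rw [if_neg ht, if_neg ht]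
    exact pvFoldl_cons_head _ _ _ _ (fun tl a => hstep tl a _) il

theorem pvUpd_not_mem (temp : List Int) (i flag : Int) (il : List (List Int))
    (hlen : il.length = temp.length) (hi : i ∉ temp) :
    pvUpd temp i flag il = il := by
  induction temp generalizing il with
  | nil => cases il with
    | nil => rfl
    | cons g il => simp at hlen
  | cons t rest ih =>
    cases il with
    | nil => simp at hlen
    | cons g il =>
      have ht : t ≠ i := fun h => hi (h ▸ List.mem_cons_self ..)
      rw [pvUpd_cons, if_neg ht,
        ih il (by simpa using hlen) (fun h => hi (List.mem_cons_of_mem _ h))]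

theorem pvUpd_mem (temp : List Int) (i flag : Int) (il : List (List Int))
    (hlen : il.length = temp.length) (hn : temp.Nodup) (hi : i ∈ temp) :
    pvUpd temp i flag il = il.modify (List.idxOf i temp) (· ++ [flag]) := by
  induction temp generalizing il with
  | nil => simp at hi
  | cons t rest ih =>
    cases il with
    | nil => simp at hlen
    | cons g il =>
      by_cases ht : t = i
      · rw [pvUpd_cons, if_pos ht,
          pvUpd_not_mem rest i flag il (by simpa using hlen)
            (by subst ht; exact (List.nodup_cons.mp hn).1)]
        simp [ht, List.modify_cons]
      · have hi' : i ∈ rest := by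
          rcases List.mem_cons.mp hi with h | h
          · exact absurd h.symm ht
          · exact h
        rw [pvUpd_cons, if_neg ht, ih il (by simpa using hlen) (List.nodup_cons.mp hn).2 hi']
        simp [ht]

theorem pvMap_modify {α β : Type} (g : α → β) (l : List α) (n : Nat)
    (f : α → α) (f' : β → β) (h : ∀ x, g (f x) = f' (g x)) :
    (l.modify n f).map g = (l.map g).modify n f' := by
  induction l generalizing n with
  | nil => rw [List.modify_nil, List.map_nil, List.modify_nil]
  | cons x xs ih =>
    cases n with
    | zero => simp [h]
    | succ n => simp [ih]

theorem pvModify_append_len {α : Type} (l : List α) (x : α) (f : α → α) :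
    (l ++ [x]).modify l.length f = l ++ [f x] := by
  induction l with
  | nil => simp
  | cons y ys ih => simp [ih]

-- the invariant relating A's phase-1 state to B's state
def pvInv (t : Nat) (sa : List Int × List (List Int) × Int)
    (sb : List Int × List (List (List Int))) (list : List (List Int)) : Prop :=
  sb.1 = sa.1 ∧ sa.1.Nodup ∧ sa.2.2 = (t : Int) ∧ sa.2.1.length = sa.1.length ∧
    sb.2 = sa.2.1.map (fun il => il.map (fun j => pvColAt list j))

theorem pvFindIdx?_beq_eq_none (keys : List Int) (i : Int) (hi : i ∉ keys) :
    keys.findIdx? (· == i) = none := by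
  rw [List.findIdx?_eq_none_iff]
  intro x hx
  have hne : x ≠ i := fun h => hi (h ▸ hx)
  simp [hne]

theorem pvFindIdx?_beq_eq_idxOf (keys : List Int) (i : Int) (hi : i ∈ keys) :
    keys.findIdx? (· == i) = some (List.idxOf i keys) := by
  induction keys with
  | nil => simp at hi
  | cons k ks ih =>
    by_cases hk : k = i
    · simp [List.findIdx?_cons, hk]
    · have hik : i ∈ ks := by
        rcases List.mem_cons.mp hi with h | h
        · exact absurd h.symm hk
        · exact h
      simp [List.findIdx?_cons, hk, ih hik]

theorem pvStep_inv (r0 : List Int) (rest : List (List Int)) (t : Nat)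
    (ht : t < r0.length) (temp : List Int) (il : List (List Int))
    (hn : temp.Nodup) (hl : il.length = temp.length) :
    pvInv (t + 1) (pvStepA (temp, il, (t : Int)) r0[t])
      (pvStepB (temp, il.map (fun l => l.map (fun j => pvColAt (r0 :: rest) j)))
        (pvColAt (r0 :: rest) (t : Int))) (r0 :: rest) := by
  have hcol0 : PySem.List.pyGetD (pvColAt (r0 :: rest) (t : Int)) 0 0 = r0[t] := by
    unfold pvColAt
    rw [List.map_cons, PySem.List.pyGetD_zero_cons, PySem.List.pyGetD_natCast]
    simp [List.getD_eq_getElem?_getD, ht]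
  by_cases hi : r0[t] ∈ temp
  · -- existing key: A appends flag at idxOf, B appends the column at the same index
    obtain ⟨k, hks⟩ :=
      Option.isSome_iff_exists.mp ((PySem.List.index?_isSome_iff temp r0[t]).mpr hi)
    have eA : pvStepA (temp, il, (t : Int)) r0[t]
        = (temp, pvUpd temp r0[t] (t : Int) il, (t : Int) + 1) := by
      simp only [pvStepA, hks]
    have eB : pvStepB (temp, il.map (fun l => l.map (fun j => pvColAt (r0 :: rest) j)))
          (pvColAt (r0 :: rest) (t : Int))
        = (temp, (il.map (fun l => l.map (fun j => pvColAt (r0 :: rest) j))).modify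
            (List.idxOf r0[t] temp) (· ++ [pvColAt (r0 :: rest) (t : Int)])) := by
      simp only [pvStepB, hcol0, pvFindIdx?_beq_eq_idxOf temp r0[t] hi]
    rw [eA, eB]
    refine ⟨rfl, hn, by push_cast; ring, ?_, ?_⟩
    · rw [pvUpd_mem temp r0[t] (t : Int) il hl hn hi]
      simp [hl]
    · rw [pvUpd_mem temp r0[t] (t : Int) il hl hn hi]
      exact (pvMap_modify _ il (List.idxOf r0[t] temp) (· ++ [(t : Int)])
        (· ++ [pvColAt (r0 :: rest) (t : Int)]) (by intro x; simp)).symm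
  · -- new key: both append a fresh singleton group at the end
    have hnone : PySem.List.index? temp r0[t] = none :=
      (PySem.List.index?_eq_none_iff temp r0[t]).mpr hi
    have hn' : (temp ++ [r0[t]]).Nodup := by
      rw [List.nodup_append]
      refine ⟨hn, List.nodup_singleton _, ?_⟩
      intro a ha b hb
      rw [List.mem_singleton] at hb
      subst hb
      exact fun h => hi (h ▸ ha)
    have hmem : r0[t] ∈ temp ++ [r0[t]] := by simp
    have hidx : List.idxOf r0[t] (temp ++ [r0[t]]) = il.length := by
      rw [List.idxOf_append, if_neg hi]
      simp [hl]
    have eA : pvStepA (temp, il, (t : Int)) r0[t]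
        = (temp ++ [r0[t]], pvUpd (temp ++ [r0[t]]) r0[t] (t : Int) (il ++ [[]]),
           (t : Int) + 1) := by
      simp only [pvStepA, hnone]
    have eB : pvStepB (temp, il.map (fun l => l.map (fun j => pvColAt (r0 :: rest) j)))
          (pvColAt (r0 :: rest) (t : Int))
        = (temp ++ [r0[t]], il.map (fun l => l.map (fun j => pvColAt (r0 :: rest) j))
            ++ [[pvColAt (r0 :: rest) (t : Int)]]) := by
      simp only [pvStepB, hcol0, pvFindIdx?_beq_eq_none temp r0[t] hi]
    rw [eA, eB]
    refine ⟨rfl, hn', by push_cast; ring, ?_, ?_⟩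
    · rw [pvUpd_mem (temp ++ [r0[t]]) r0[t] (t : Int) (il ++ [[]]) (by simp [hl]) hn' hmem]
      simp [hl]
    · rw [pvUpd_mem (temp ++ [r0[t]]) r0[t] (t : Int) (il ++ [[]]) (by simp [hl]) hn' hmem]
      rw [hidx, pvModify_append_len]
      simp

theorem pvFold_inv (r0 : List Int) (rest : List (List Int)) (t : Nat)
    (ht : t ≤ r0.length) :
    pvInv t ((r0.take t).foldl pvStepA ([], [], 0))
      (((List.range t).map (fun (j : Nat) => pvColAt (r0 :: rest) (j : Int))).foldl
        pvStepB ([], [])) (r0 :: rest) := by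
  induction t with
  | zero => exact ⟨rfl, List.nodup_nil, rfl, rfl, rfl⟩
  | succ t ih =>
    have ht' : t < r0.length := ht
    obtain ⟨hk, hn, hf, hl, hs⟩ := ih (Nat.le_of_lt ht')
    have h1 : r0.take (t + 1) = r0.take t ++ [r0[t]] := by
      rw [List.take_add_one, List.getElem?_eq_getElem ht']
      rfl
    rw [h1, List.range_succ, List.map_append, List.foldl_append, List.foldl_append,
      List.map_cons, List.map_nil, List.foldl_cons, List.foldl_nil,
      List.foldl_cons, List.foldl_nil]
    have eA : (r0.take t).foldl pvStepA ([], [], 0)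
        = (((r0.take t).foldl pvStepA ([], [], 0)).1,
           ((r0.take t).foldl pvStepA ([], [], 0)).2.1, (t : Int)) := by
      rw [← hf]
    have eB : (((List.range t).map (fun (j : Nat) => pvColAt (r0 :: rest) (j : Int))).foldl
          pvStepB ([], []))
        = (((r0.take t).foldl pvStepA ([], [], 0)).1,
           (((r0.take t).foldl pvStepA ([], [], 0)).2.1).map
             (fun l => l.map (fun j => pvColAt (r0 :: rest) j))) := by
      exact Prod.ext_iff.mpr ⟨hk, hs⟩
    have hstep := pvStep_inv r0 rest t ht'
      ((r0.take t).foldl pvStepA ([], [], 0)).1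
      ((r0.take t).foldl pvStepA ([], [], 0)).2.1 hn hl
    rw [← eA, ← eB] at hstep
    exact hstep

theorem pvColFold (list : List (List Int)) (j : Int) :
    (PySem.List.pyRange 0 (list.length : Int) 1).foldl (fun col k =>
      col ++ [PySem.List.pyGetD (PySem.List.pyGetD list k []) j 0]) [] = pvColAt list j := by
  rw [show ((list.length : Int)) = PySem.List.len list from rfl]
  rw [PySem.List.foldl_pyRange_zero_pyGetD list []
    (fun col row => col ++ [PySem.List.pyGetD row j 0]) []]
  rw [PySem.List.foldl_append_singleton_eq_map]
  rfl

theorem pvPhase2 (list : List (List Int)) (index_list : List (List Int)) :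
    index_list.foldl (fun s_i il =>
      s_i ++ [il.foldl (fun grp j =>
        grp ++ [(PySem.List.pyRange 0 (list.length : Int) 1).foldl (fun col k =>
          col ++ [PySem.List.pyGetD (PySem.List.pyGetD list k []) j 0]) []]) []]) []
    = index_list.map (fun il => il.map (fun j => pvColAt list j)) := by
  rw [PySem.List.foldl_append_singleton_eq_map]
  simp only [List.nil_append]
  apply List.map_congr_left
  intro il _
  rw [PySem.List.foldl_append_singleton_eq_map]
  simp only [List.nil_append]
  apply List.map_congr_left
  intro j _
  exact pvColFold list j

theorem pvStepA_eq : (fun (st : List Int × List (List Int) × Int) i =>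
      match st with
      | (temp, index_list, flag) =>
        let (temp, index_list) :=
          match PySem.List.index? temp i with
          | some _ => (temp, index_list)
          | none => (temp ++ [i], index_list ++ [[]])
        let index_list :=
          (List.range temp.length).foldl (fun il (a : Nat) =>
            if PySem.List.pyGetD temp (a : Int) 0 = i then il.modify a (· ++ [flag]) else il)
            index_list
        (temp, index_list, flag + 1)) = pvStepA := by
  funext st i
  obtain ⟨a, b, c⟩ := st
  rfl

theorem pvStepB_eq : (fun (st : List Int × List (List (List Int))) (col : List Int) =>
      let h := PySem.List.pyGetD col 0 0
      match st.1.findIdx? (· == h) with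
      | some a => (st.1, st.2.modify a (· ++ [col]))
      | none => (st.1 ++ [h], st.2 ++ [[col]])) = pvStepB := by
  funext st col
  rfl

theorem pvPorts_eq (list : List (List Int)) : split_list list = split_list_alt list := by
  cases list with
  | nil => rfl
  | cons r0 rest =>
    unfold split_list split_list_alt
    simp only [PySem.List.pyGetD_zero_cons]
    rw [pvStepA_eq, pvStepB_eq, pvPhase2 (r0 :: rest)]
    rw [show (fun (j : Nat) => (r0 :: rest).map (fun row => PySem.List.pyGetD row (j : Int) 0))
        = (fun (j : Nat) => pvColAt (r0 :: rest) (j : Int)) from rfl]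
    have hinv := pvFold_inv r0 rest r0.length (Nat.le_refl _)
    rw [List.take_length] at hinv
    exact hinv.2.2.2.2.symm

-- ===== VERDICT (by name: the statement is the Claim_ definition above) =====
theorem split_list_spec : Claim_equal_split_list := by
  intro list _ _
  unfold Spec_split_list
  exact pvPorts_eq list
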